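-- pv_equiv track=rewrite | github.com/j-ble/TradingBot | historyBot/candleBias/4H/backtest_4h_bias_v2.py | detect_death_spirals
-- ===== SOURCE A (Python) =====
-- def detect_death_spirals(results, threshold=5):
--     """Detect clustered failures."""
--     spirals = []
--     current_streak = 0
--     streak_start = None
--
--     for i, result in enumerate(results):
--         if result['outcome'] == 'WRONG':
--             if current_streak == 0:
--                 streak_start = i
--             current_streak += 1
--         else:
--             if current_streak >= threshold:
--                 spirals.append({'length': current_streak, 'start_idx': streak_start})
--             current_streak = 0
--
--     if current_streak >= threshold:
--         spirals.append({'length': current_streak, 'start_idx': streak_start})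
--
--     return spirals
-- ===== SOURCE B (Python) =====
-- def detect_death_spirals(results, threshold=5):
--     """Detect clustered failures by splitting into maximal runs of equal flags."""
--     flags = [r['outcome'] == 'WRONG' for r in results]
--     spirals = []
--     idx = 0
--     while flags:
--         run = 1
--         while run < len(flags) and flags[run] == flags[0]:
--             run += 1
--         if flags[0] and run >= threshold:
--             spirals.append({'length': run, 'start_idx': idx})
--         idx += run
--         flags = flags[run:]
--     return spirals
-- ===== Notes on version B (the rewrite author's own statement) =====
-- stated objective: idiomatic
-- what changed: B first maps each item to a WRONG flag, then partitions the flag list into maximal runs and keeps the WRONG runs of sufficient length, replacing A's streak counter, reset logic and post-loop flush with a group-then-filter pass.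
-- outside the precondition, e.g. on detect_death_spirals([], 0): A returns [{'length': 0, 'start_idx': None}], B returns []; on detect_death_spirals([{}], 5): A raises KeyError, B raises KeyError
import Mathlib
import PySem

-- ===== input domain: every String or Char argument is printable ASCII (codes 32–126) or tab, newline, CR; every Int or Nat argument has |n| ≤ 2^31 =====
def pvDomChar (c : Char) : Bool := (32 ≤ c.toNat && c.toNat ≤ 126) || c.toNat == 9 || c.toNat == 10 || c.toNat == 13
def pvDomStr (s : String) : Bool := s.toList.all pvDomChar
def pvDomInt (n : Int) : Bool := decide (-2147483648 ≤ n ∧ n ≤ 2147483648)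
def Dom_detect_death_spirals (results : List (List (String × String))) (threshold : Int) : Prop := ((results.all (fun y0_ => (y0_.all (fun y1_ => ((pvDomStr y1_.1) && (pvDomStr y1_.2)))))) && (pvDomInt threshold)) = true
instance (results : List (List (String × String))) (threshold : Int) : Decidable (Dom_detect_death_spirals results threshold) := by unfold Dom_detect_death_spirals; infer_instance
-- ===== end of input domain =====

-- B replaces A's running streak counter / reset logic / post-loop flush by mapping each item to a
-- WRONG flag and partitioning the flag list into maximal runs, keeping long WRONG runs (idiomatic).

-- ===== PORT A =====
-- the WRONG flag of an item; under Pre_ the key "outcome" is present, so getD's default is never used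
def dsFlag (r : List (String × String)) : Bool :=
  PySem.Dict.getD (PySem.Dict.mk r) "outcome" "" == "WRONG"

-- A's for-loop: state = (spirals, current_streak, streak_start); streak_start = none is Python's
-- None — under Pre_ it is some _ whenever a spiral is appended, so `.getD 0` is never used
def dsA_go (threshold : Int) :
    List (List (String × String)) → Int →
    List (List (String × Int)) × Int × Option Int →
    List (List (String × Int)) × Int × Option Int
  | [], _, st => st
  | r :: rest, i, (spirals, streak, start) =>
      if dsFlag r then
        dsA_go threshold rest (i + 1) (spirals, streak + 1, if streak = 0 then some i else start)
      else
        dsA_go threshold rest (i + 1)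
          (if threshold ≤ streak then
             spirals ++ [[("length", streak), ("start_idx", start.getD 0)]]
           else spirals, 0, start)

def detect_death_spirals (results : List (List (String × String))) (threshold : Int) : List (List (String × Int)) :=
  let st := dsA_go threshold results 0 ([], 0, none)
  if threshold ≤ st.2.1 then
    st.1 ++ [[("length", st.2.1), ("start_idx", st.2.2.getD 0)]]
  else st.1

-- ===== PORT B =====
-- Source B's outer while-loop: peel one maximal run of equal flags per step
def dsB_go (threshold : Int) : List Bool → Int → List (List (String × Int))
  | [], _ => []
  | f :: rest, idx =>
      let run : Nat := 1 + (rest.takeWhile (· == f)).length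
      (if f && decide (threshold ≤ (run : Int)) then
         [[("length", (run : Int)), ("start_idx", idx)]]
       else []) ++ dsB_go threshold (rest.dropWhile (· == f)) (idx + run)
  termination_by flags _ => flags.length
  decreasing_by
    simp only [List.length_cons]
    exact Nat.lt_succ_of_le (List.length_dropWhile_le _ _)

def detect_death_spirals_alt (results : List (List (String × String))) (threshold : Int) : List (List (String × Int)) :=
  dsB_go threshold (results.map dsFlag) 0

-- ===== PRECONDITION & SPEC =====
-- Pre_ excludes items missing the 'outcome' key (A raises KeyError) and non-positive thresholds
-- except in the all-WRONG nonempty case: there A appends {'start_idx': None}, which is not an Int,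
-- so A's value leaves the declared return type.
def Pre_detect_death_spirals (results : List (List (String × String))) (threshold : Int) : Prop :=
  (∀ r ∈ results, (PySem.Dict.get? (PySem.Dict.mk r) "outcome").isSome) ∧
  (1 ≤ threshold ∨
    (results ≠ [] ∧ ∀ r ∈ results, PySem.Dict.get? (PySem.Dict.mk r) "outcome" = some "WRONG"))
instance (results : List (List (String × String))) (threshold : Int) : Decidable (Pre_detect_death_spirals results threshold) := by unfold Pre_detect_death_spirals; infer_instance

def pvWitness_detect_death_spirals : (List (List (String × String))) × Int :=
  ([[("outcome", "WRONG")], [("outcome", "WRONG")], [("outcome", "OK")]], 2)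

def Spec_detect_death_spirals (results : List (List (String × String))) (threshold : Int) (out : List (List (String × Int))) : Prop := out = detect_death_spirals_alt results threshold
instance (results : List (List (String × String))) (threshold : Int) (out : List (List (String × Int))) : Decidable (Spec_detect_death_spirals results threshold out) := by unfold Spec_detect_death_spirals; infer_instance

-- ===== CLAIM (what is proved, stated in full; the proofs are below) =====
def Claim_equal_detect_death_spirals : Prop := ∀ (results : List (List (String × String))) (threshold : Int), Dom_detect_death_spirals results threshold → Pre_detect_death_spirals results threshold → Spec_detect_death_spirals results threshold (detect_death_spirals results threshold)

-- ===== LEMMAS AND PROOFS =====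

-- proof-side mirror of dsA_go acting on the flag list only
def dsF_go (threshold : Int) :
    List Bool → Int →
    List (List (String × Int)) × Int × Option Int →
    List (List (String × Int)) × Int × Option Int
  | [], _, st => st
  | f :: rest, i, (spirals, streak, start) =>
      if f then
        dsF_go threshold rest (i + 1) (spirals, streak + 1, if streak = 0 then some i else start)
      else
        dsF_go threshold rest (i + 1)
          (if threshold ≤ streak then
             spirals ++ [[("length", streak), ("start_idx", start.getD 0)]]
           else spirals, 0, start)

theorem dsA_eq_dsF (threshold : Int) (results : List (List (String × String))) :
    ∀ i st, dsA_go threshold results i st = dsF_go threshold (results.map dsFlag) i st := by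
  induction results with
  | nil => intro i st; rfl
  | cons r rest ih =>
      intro i st
      obtain ⟨sp, streak, start⟩ := st
      simp only [dsA_go, List.map_cons, dsF_go]
      by_cases h : dsFlag r <;> simp [h, ih]

-- A's post-loop flush
def dsFinish (threshold : Int) (st : List (List (String × Int)) × Int × Option Int) :
    List (List (String × Int)) :=
  if threshold ≤ st.2.1 then
    st.1 ++ [[("length", st.2.1), ("start_idx", st.2.2.getD 0)]]
  else st.1

-- consuming a run of trues with a positive streak just adds the run length to the streak
theorem dsF_true_run (threshold : Int) (t : List Bool) (ht : ∀ x ∈ t, x = true) :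
    ∀ rest i sp (j : Int) st, 1 ≤ j →
      dsF_go threshold (t ++ rest) i (sp, j, st)
        = dsF_go threshold rest (i + t.length) (sp, j + t.length, st) := by
  induction t with
  | nil => intro rest i sp j st hj; simp
  | cons x t ih =>
      intro rest i sp j st hj
      have hx : x = true := ht x (by simp)
      subst hx
      simp only [List.cons_append, dsF_go, if_true]
      rw [if_neg (by omega : ¬ (j = 0))]
      rw [ih (fun y hy => ht y (by simp [hy])) rest (i + 1) sp (j + 1) st (by omega)]
      have e1 : i + 1 + (t.length : Int) = i + ((t.length + 1 : Nat) : Int) := by push_cast; ring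
      have e2 : j + 1 + (t.length : Int) = j + ((t.length + 1 : Nat) : Int) := by push_cast; ring
      simp only [List.length_cons]
      rw [e1, e2]

-- consuming a run of falses with streak 0 changes nothing (threshold ≥ 1)
theorem dsF_false_run (threshold : Int) (hth : 1 ≤ threshold) (t : List Bool)
    (ht : ∀ x ∈ t, x = false) :
    ∀ rest i sp st,
      dsF_go threshold (t ++ rest) i (sp, 0, st)
        = dsF_go threshold rest (i + t.length) (sp, 0, st) := by
  induction t with
  | nil => intro rest i sp st; simp
  | cons x t ih =>
      intro rest i sp st
      have hx : x = false := ht x (by simp)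
      subst hx
      simp only [List.cons_append, dsF_go, Bool.false_eq_true, if_false]
      rw [if_neg (by omega : ¬ (threshold ≤ (0 : Int)))]
      rw [ih (fun y hy => ht y (by simp [hy])) rest (i + 1) sp st]
      have e1 : i + 1 + (t.length : Int) = i + ((t.length + 1 : Nat) : Int) := by push_cast; ring
      simp only [List.length_cons]
      rw [e1]

theorem dropWhile_head_false {p : Bool → Bool} :
    ∀ (l : List Bool) (hd : Bool) (tl : List Bool), l.dropWhile p = hd :: tl → p hd = false := by
  intro l
  induction l with
  | nil => intro hd tl h; simp [List.dropWhile] at h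
  | cons a l ih =>
      intro hd tl h
      by_cases hp : p a
      · rw [List.dropWhile_cons, if_pos hp] at h
        exact ih hd tl h
      · rw [List.dropWhile_cons, if_neg hp] at h
        cases h
        simpa using hp

-- main invariant: from streak 0, A's loop followed by its flush produces sp ++ B's runs output
theorem dsF_eq_dsB (threshold : Int) (hth : 1 ≤ threshold) :
    ∀ (n : Nat) (flags : List Bool), flags.length ≤ n → ∀ (i : Int) sp st,
      dsFinish threshold (dsF_go threshold flags i (sp, 0, st)) = sp ++ dsB_go threshold flags i := by
  intro n
  induction n with
  | zero =>
      intro flags hf i sp st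
      have : flags = [] := List.eq_nil_of_length_eq_zero (Nat.le_zero.mp hf)
      subst this
      simp only [dsF_go, dsB_go, dsFinish]
      rw [if_neg (by omega : ¬ (threshold ≤ (0 : Int)))]
      simp
  | succ n ihn =>
      intro flags hf i sp st
      match flags with
      | [] =>
          simp only [dsF_go, dsB_go, dsFinish]
          rw [if_neg (by omega : ¬ (threshold ≤ (0 : Int)))]
          simp
      | (f :: rest) =>
          have hrest : rest.length ≤ n := by simpa using hf
          have hsplit : rest.takeWhile (· == f) ++ rest.dropWhile (· == f) = rest :=
            List.takeWhile_append_dropWhile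
          have hdlen : (rest.dropWhile (· == f)).length ≤ n :=
            le_trans (List.length_dropWhile_le _ _) hrest
          cases f with
          | false =>
              have hstep : dsF_go threshold (false :: rest) i (sp, 0, st)
                  = dsF_go threshold rest (i + 1) (sp, 0, st) := by
                simp only [dsF_go, Bool.false_eq_true, if_false]
                rw [if_neg (by omega : ¬ (threshold ≤ (0 : Int)))]
              have htmem : ∀ x ∈ rest.takeWhile (· == false), x = false := by
                intro x hx
                simpa using List.mem_takeWhile_imp hx
              rw [hstep, ← hsplit, dsF_false_run threshold hth _ htmem, hsplit]
              rw [ihn _ hdlen _ sp st]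
              rw [dsB_go]
              simp only [Bool.false_and]
              congr 2
              push_cast
              ring
          | true =>
              have hstep : dsF_go threshold (true :: rest) i (sp, 0, st)
                  = dsF_go threshold rest (i + 1) (sp, (1 : Int), some i) := by
                simp [dsF_go]
              have htmem : ∀ x ∈ rest.takeWhile (· == true), x = true := by
                intro x hx
                simpa using List.mem_takeWhile_imp hx
              rw [hstep, ← hsplit,
                dsF_true_run threshold _ htmem _ _ _ _ _ (le_refl (1 : Int)), hsplit]
              rw [dsB_go]
              simp only [Bool.true_and]
              rcases hdd : rest.dropWhile (· == true) with _ | ⟨hd, d2⟩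
              · simp only [dsF_go, dsFinish]
                rw [dsB_go]
                have ecast : (1 : Int) + ((rest.takeWhile (· == true)).length : Int)
                    = ((1 + (rest.takeWhile (· == true)).length : Nat) : Int) := by
                  push_cast; ring
                rw [ecast]
                by_cases hc : threshold ≤ ((1 + (rest.takeWhile (· == true)).length : Nat) : Int)
                · rw [if_pos hc, if_pos (by simpa using hc)]
                  simp
                · rw [if_neg hc, if_neg (by simpa using hc)]
                  simp
              · have hhd : hd = false := by
                  have := dropWhile_head_false rest hd d2 hdd
                  simpa using this
                subst hhd
                have hstep2 : ∀ sp0 : List (List (String × Int)),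
                    dsF_go threshold (false :: d2)
                        (i + 1 + ((rest.takeWhile (· == true)).length : Int)) (sp0, 0, some i)
                      = dsF_go threshold d2
                        (i + 1 + ((rest.takeWhile (· == true)).length : Int) + 1)
                        (sp0, 0, some i) := by
                  intro sp0
                  simp only [dsF_go, Bool.false_eq_true, if_false]
                  rw [if_neg (by omega : ¬ (threshold ≤ (0 : Int)))]
                -- A consumes the false, flushing the streak into the accumulator
                have hflush : dsF_go threshold (false :: d2)
                      (i + 1 + ((rest.takeWhile (· == true)).length : Int))
                      (sp, 1 + ((rest.takeWhile (· == true)).length : Int), some i)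
                    = dsF_go threshold (false :: d2)
                      (i + 1 + ((rest.takeWhile (· == true)).length : Int))
                      (if threshold ≤ 1 + ((rest.takeWhile (· == true)).length : Int) then
                         sp ++ [[("length", 1 + ((rest.takeWhile (· == true)).length : Int)),
                                 ("start_idx", i)]]
                       else sp, 0, some i) := by
                  conv_lhs => rw [dsF_go]
                  rw [hstep2]
                  simp
                have hd2len : (false :: d2).length ≤ n := by
                  rw [← hdd]; exact hdlen
                rw [hflush, ihn _ hd2len _ _ (some i)]
                have ecast : (1 : Int) + ((rest.takeWhile (· == true)).length : Int)
                    = ((1 + (rest.takeWhile (· == true)).length : Nat) : Int) := by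
                  push_cast; ring
                have eidx : i + 1 + ((rest.takeWhile (· == true)).length : Int)
                    = i + ((1 + (rest.takeWhile (· == true)).length : Nat) : Int) := by
                  push_cast; ring
                rw [ecast, eidx]
                by_cases hc : threshold ≤ ((1 + (rest.takeWhile (· == true)).length : Nat) : Int)
                · rw [if_pos hc, if_pos (by simpa using hc)]
                  simp [List.append_assoc]
                · rw [if_neg hc, if_neg (by simpa using hc)]
                  simp

-- the all-WRONG nonempty case: no reset and no inner flush ever happens, any threshold works
theorem dsF_eq_dsB_allTrue (threshold : Int) (flags : List Bool) (hne : flags ≠ [])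
    (hall : ∀ x ∈ flags, x = true) :
    dsFinish threshold (dsF_go threshold flags 0 ([], 0, none)) = dsB_go threshold flags 0 := by
  match flags with
  | [] => exact absurd rfl hne
  | (f :: rest) =>
      have hf : f = true := hall f (by simp)
      subst hf
      have htw : rest.takeWhile (· == true) = rest := by
        rw [List.takeWhile_eq_self_iff]
        intro a ha
        simp [hall a (by simp [ha])]
      have hstep : dsF_go threshold (true :: rest) 0 ([], 0, none)
          = dsF_go threshold rest ((0 : Int) + 1) ([], (1 : Int), some 0) := by
        simp [dsF_go]
      have hall' : ∀ x ∈ rest, x = true := fun x hx => hall x (by simp [hx])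
      have hrun : dsF_go threshold rest ((0 : Int) + 1) ([], (1 : Int), some 0)
          = dsF_go threshold ([] : List Bool) ((0 : Int) + 1 + (rest.length : Int))
              ([], 1 + (rest.length : Int), some 0) := by
        conv_lhs => rw [show rest = rest ++ [] by simp]
        exact dsF_true_run threshold rest hall' [] _ _ _ _ (le_refl (1 : Int))
      rw [hstep, hrun, dsB_go]
      have hdw : rest.dropWhile (· == true) = [] := by
        rw [List.dropWhile_eq_nil_iff]
        intro a ha
        simp [hall' a ha]
      rw [htw, hdw, dsB_go]
      simp only [dsF_go, dsFinish, Bool.true_and, List.append_nil]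
      have ecast : (1 : Int) + (rest.length : Int) = ((1 + rest.length : Nat) : Int) := by
        push_cast; ring
      rw [ecast]
      by_cases hc : threshold ≤ ((1 + rest.length : Nat) : Int)
      · rw [if_pos hc, if_pos (by simpa using hc)]
        simp
      · rw [if_neg hc, if_neg (by simpa using hc)]

theorem dsFlag_true_of_wrong (r : List (String × String))
    (h : PySem.Dict.get? (PySem.Dict.mk r) "outcome" = some "WRONG") : dsFlag r = true := by
  unfold dsFlag
  rw [PySem.Dict.getD_eq_get?_getD, h]
  simp

-- ===== VERDICT (by name: the statement is the Claim_ definition above) =====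
theorem detect_death_spirals_spec : Claim_equal_detect_death_spirals := by
  unfold Claim_equal_detect_death_spirals
  intro results threshold _ hpre
  unfold Spec_detect_death_spirals detect_death_spirals_alt
  rw [show detect_death_spirals results threshold
      = dsFinish threshold (dsA_go threshold results 0 ([], 0, none)) from rfl]
  rw [dsA_eq_dsF]
  obtain ⟨_, hth | ⟨hne, hall⟩⟩ := hpre
  · simpa using
      dsF_eq_dsB threshold hth (results.map dsFlag).length (results.map dsFlag) le_rfl 0 [] none
  · exact dsF_eq_dsB_allTrue threshold (results.map dsFlag)
      (by simpa using hne)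
      (by intro x hx
          obtain ⟨r, hr, rfl⟩ := List.mem_map.mp hx
          exact dsFlag_true_of_wrong r (hall r hr))
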